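-- pv_equiv track=rewrite | github.com/Hasosh/Hydrogen-Prediction | src/utils.py | dfs_with_depth
-- ===== SOURCE A (Python) =====
-- def dfs_with_depth(graph, start_node, depth):
--     stack = [(start_node, 0)]
--     neighbors_at_depth = []
--     while stack:
--         current_node, current_depth = stack.pop()
--         if current_depth < depth:
--             if current_node in graph:
--                 for neighbor in graph[current_node]:
--                     stack.append((neighbor, current_depth + 1))
--                     if current_depth + 1 == depth:
--                         neighbors_at_depth.append((current_node, neighbor))
--     return neighbors_at_depth
-- ===== SOURCE B (Python) =====
-- def dfs_with_depth(graph, start_node, depth):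
--     # Recursive DFS (same visitation order as the explicit-stack version: a
--     # LIFO stack pops pushed neighbors in reverse, so we descend in reversed order).
--     edges = []
--
--     def rec(node, d):
--         if d < depth and node in graph:
--             if d + 1 == depth:
--                 for nb in graph[node]:
--                     edges.append((node, nb))
--             else:
--                 for nb in reversed(graph[node]):
--                     rec(nb, d + 1)
--
--     rec(start_node, 0)
--     return edges
-- ===== Notes on version B (the rewrite author's own statement) =====
-- stated objective: simpler
-- what changed: Replaced A's explicit LIFO stack loop with a recursive DFS helper that descends through neighbors in reversed order (matching the stack's pop order) and emits final-level edges in forward order.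
import Mathlib
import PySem

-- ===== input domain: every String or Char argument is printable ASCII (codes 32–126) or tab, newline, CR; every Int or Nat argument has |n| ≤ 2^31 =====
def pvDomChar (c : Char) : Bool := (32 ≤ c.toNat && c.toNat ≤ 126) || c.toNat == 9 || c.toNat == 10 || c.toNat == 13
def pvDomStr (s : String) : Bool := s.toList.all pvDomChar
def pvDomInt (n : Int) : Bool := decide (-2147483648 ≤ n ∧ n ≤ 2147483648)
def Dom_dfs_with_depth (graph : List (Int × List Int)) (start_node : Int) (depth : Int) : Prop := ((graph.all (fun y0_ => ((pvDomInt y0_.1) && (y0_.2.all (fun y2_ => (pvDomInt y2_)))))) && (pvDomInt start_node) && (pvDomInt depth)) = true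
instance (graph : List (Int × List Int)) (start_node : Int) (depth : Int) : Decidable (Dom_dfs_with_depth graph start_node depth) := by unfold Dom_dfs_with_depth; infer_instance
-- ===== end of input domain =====

-- B replaces A's explicit stack by a recursive DFS (same visitation order); objective: simpler decomposition, same cost.


-- ===== PORT A =====
-- cited by name in the ports' decreasing_by (termination of the bounded-depth recursions)
theorem pvDec {d depth : Int} (h : d < depth) : (depth - (d + 1)).toNat < (depth - d).toNat := by
  omega

-- the body of A's inner `for neighbor in graph[current_node]` loop, acting on (stack, neighbors_at_depth)
def pvStep (depth d n : Int) (st : List (Int × Int) × List (Int × Int)) (nb : Int) :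
    List (Int × Int) × List (Int × Int) :=
  ((nb, d + 1) :: st.1, if d + 1 == depth then st.2 ++ [(n, nb)] else st.2)

-- termination measure for A's while loop: number of pops one stack entry generates
def pvCost (graph : List (Int × List Int)) (depth d n : Int) : Nat :=
  1 + (if _h : d < depth then
        (((graph.lookup n).getD []).map (fun nb => pvCost graph depth (d + 1) nb)).sum
      else 0)
termination_by (depth - d).toNat
decreasing_by exact pvDec _h

def pvCostStack (graph : List (Int × List Int)) (depth : Int) (stack : List (Int × Int)) : Nat :=
  (stack.map (fun p => pvCost graph depth p.2 p.1)).sum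

theorem pvCost_pos (graph : List (Int × List Int)) (depth d n : Int) :
    1 ≤ pvCost graph depth d n := by rw [pvCost]; omega

theorem pvStep_foldl_fst (depth d n : Int) (nbs : List Int)
    (st acc : List (Int × Int)) :
    (nbs.foldl (pvStep depth d n) (st, acc)).1 = (nbs.map (fun nb => (nb, d + 1))).reverse ++ st := by
  induction nbs generalizing st acc with
  | nil => simp
  | cons x xs ih => simp [pvStep, ih]

theorem pvCostStack_after_push (graph : List (Int × List Int)) (depth d : Int)
    (nbs : List Int) (rest : List (Int × Int)) :
    pvCostStack graph depth ((nbs.map (fun nb => (nb, d + 1))).reverse ++ rest)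
      = (nbs.map (fun nb => pvCost graph depth (d + 1) nb)).sum + pvCostStack graph depth rest := by
  simp [pvCostStack, Function.comp_def]

theorem pvCostStack_push_lt (graph : List (Int × List Int)) (depth d n : Int)
    (rest acc : List (Int × Int)) (h : d < depth) :
    pvCostStack graph depth (((graph.lookup n).getD []).foldl (pvStep depth d n) (rest, acc)).1
      < pvCostStack graph depth ((n, d) :: rest) := by
  rw [pvStep_foldl_fst depth d n ((List.lookup n graph).getD []) rest acc,
    pvCostStack_after_push graph depth d ((List.lookup n graph).getD []) rest]
  have h1 : pvCost graph depth d n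
      = 1 + (((graph.lookup n).getD []).map (fun nb => pvCost graph depth (d + 1) nb)).sum := by
    rw [pvCost]; simp [h]
  simp only [pvCostStack, List.map_cons, List.sum_cons]
  omega

theorem pvCostStack_tail_lt (graph : List (Int × List Int)) (depth d n : Int)
    (rest : List (Int × Int)) :
    pvCostStack graph depth rest < pvCostStack graph depth ((n, d) :: rest) := by
  have := pvCost_pos graph depth d n
  simp only [pvCostStack, List.map_cons, List.sum_cons]
  omega

-- A's while loop over (stack, neighbors_at_depth); `(graph.lookup n).isSome` is `current_node in graph`
def pvLoopA (graph : List (Int × List Int)) (depth : Int) :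
    List (Int × Int) → List (Int × Int) → List (Int × Int)
  | [], acc => acc
  | (n, d) :: rest, acc =>
    if h : d < depth then
      if (graph.lookup n).isSome then
        pvLoopA graph depth
          (((graph.lookup n).getD []).foldl (pvStep depth d n) (rest, acc)).1
          (((graph.lookup n).getD []).foldl (pvStep depth d n) (rest, acc)).2
      else pvLoopA graph depth rest acc
    else pvLoopA graph depth rest acc
termination_by stack _ => pvCostStack graph depth stack
decreasing_by
  · exact pvCostStack_push_lt graph depth d n rest acc h
  · exact pvCostStack_tail_lt graph depth d n rest
  · exact pvCostStack_tail_lt graph depth d n rest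

def dfs_with_depth (graph : List (Int × List Int)) (start_node : Int) (depth : Int) : List (Int × Int) :=
  pvLoopA graph depth [(start_node, 0)] []

-- ===== PORT B =====
-- cited by name in pvRec's decreasing_by
theorem pvDecAlt {d depth : Int} (h : d < depth) : (depth - (d + 1)).toNat < (depth - d).toNat := by
  omega

-- B's recursive DFS helper `rec(node, d)` (returns the edges it appends, in append order)
def pvRec (graph : List (Int × List Int)) (depth : Int) (n d : Int) : List (Int × Int) :=
  if _h : d < depth then
    if (graph.lookup n).isSome then
      if d + 1 == depth then ((graph.lookup n).getD []).map (fun nb => (n, nb))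
      else ((graph.lookup n).getD []).reverse.flatMap (fun c => pvRec graph depth c (d + 1))
    else []
  else []
termination_by (depth - d).toNat
decreasing_by exact pvDecAlt _h

def dfs_with_depth_alt (graph : List (Int × List Int)) (start_node : Int) (depth : Int) : List (Int × Int) :=
  pvRec graph depth start_node 0

-- ===== PRECONDITION & SPEC =====
def Spec_dfs_with_depth (graph : List (Int × List Int)) (start_node : Int) (depth : Int) (out : List (Int × Int)) : Prop := out = dfs_with_depth_alt graph start_node depth
instance (graph : List (Int × List Int)) (start_node : Int) (depth : Int) (out : List (Int × Int)) : Decidable (Spec_dfs_with_depth graph start_node depth out) := by unfold Spec_dfs_with_depth; infer_instance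

-- ===== CLAIM (what is proved, stated in full; the proofs are below) =====
def Claim_equal_dfs_with_depth : Prop := ∀ (graph : List (Int × List Int)) (start_node : Int) (depth : Int), Dom_dfs_with_depth graph start_node depth → Spec_dfs_with_depth graph start_node depth (dfs_with_depth graph start_node depth)

-- ===== LEMMAS AND PROOFS =====
theorem pvStep_foldl_snd (depth d n : Int) (nbs : List Int)
    (st acc : List (Int × Int)) :
    (nbs.foldl (pvStep depth d n) (st, acc)).2
      = acc ++ (if d + 1 == depth then nbs.map (fun nb => (n, nb)) else []) := by
  induction nbs generalizing st acc with
  | nil => simp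
  | cons x xs ih =>
    by_cases hq : d + 1 = depth <;> simp [pvStep, ih, hq]

theorem pvRec_of_not_lt (graph : List (Int × List Int)) (depth n d : Int) (h : ¬ d < depth) :
    pvRec graph depth n d = [] := by rw [pvRec]; simp [h]

theorem pvLoopA_eq (graph : List (Int × List Int)) (depth : Int) :
    ∀ (stack acc : List (Int × Int)),
      pvLoopA graph depth stack acc
        = acc ++ stack.flatMap (fun p => pvRec graph depth p.1 p.2) := by
  intro stack acc
  induction stack, acc using pvLoopA.induct graph depth with
  | case1 acc => simp [pvLoopA]
  | case2 n d rest acc h hc ih =>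
    rw [pvLoopA]
    simp only [h, ↓reduceDIte, hc, ↓reduceIte]
    rw [ih, pvStep_foldl_fst, pvStep_foldl_snd]
    simp only [List.flatMap_cons]
    rw [pvRec]
    simp only [h, ↓reduceDIte, hc, ↓reduceIte]
    by_cases hq : d + 1 = depth
    · simp only [hq, beq_self_eq_true, if_true, List.flatMap_append]
      simp
      intro a _
      exact pvRec_of_not_lt graph depth a depth (by omega)
    · simp [hq, List.flatMap_append, ← List.map_reverse, List.flatMap_map]
  | case3 n d rest acc h hc ih =>
    rw [pvLoopA]
    simp only [h, ↓reduceDIte, hc]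
    rw [ih]
    simp only [List.flatMap_cons]
    rw [pvRec]
    simp [h, hc]
  | case4 n d rest acc h ih =>
    rw [pvLoopA]
    simp only [h, ↓reduceDIte]
    rw [ih]
    simp only [List.flatMap_cons]
    rw [pvRec_of_not_lt graph depth n d h]
    simp

-- ===== VERDICT (by name: the statement is the Claim_ definition above) =====
theorem dfs_with_depth_spec : Claim_equal_dfs_with_depth := by
  intro graph s depth _
  show dfs_with_depth graph s depth = dfs_with_depth_alt graph s depth
  rw [dfs_with_depth, pvLoopA_eq]
  simp [dfs_with_depth_alt]
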